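-- pv_equiv track=rewrite | github.com/vigneshsabapathi/python-algorithms | bit_manipulation/binary_xor_operator_optimized.py | binary_xor_ascii
-- ===== SOURCE A (Python) =====
-- def binary_xor_ascii(a: int, b: int) -> str:
--     """
--     Binary XOR using ASCII arithmetic on digit characters.
--
--     ord('0')=48, ord('1')=49. XOR of two binary digit chars:
--     ord(ca) ^ ord(cb) gives 0 (same) or 1 (different).
--     chr(48 + result) maps back to '0' or '1' without int() parse per char.
--
--     >>> binary_xor_ascii(25, 32)
--     '0b111001'
--     >>> binary_xor_ascii(37, 50)
--     '0b010111'
--     >>> binary_xor_ascii(21, 30)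
--     '0b01011'
--     >>> binary_xor_ascii(58, 73)
--     '0b1110011'
--     >>> binary_xor_ascii(0, 255)
--     '0b11111111'
--     >>> binary_xor_ascii(256, 256)
--     '0b000000000'
--     >>> binary_xor_ascii(0, -1)
--     Traceback (most recent call last):
--         ...
--     ValueError: the value of both inputs must be positive
--     """
--     if a < 0 or b < 0:
--         raise ValueError("the value of both inputs must be positive")
--     a_bin = format(a, "b")
--     b_bin = format(b, "b")
--     max_len = max(len(a_bin), len(b_bin))
--     return "0b" + "".join(
--         chr(48 + (ord(ca) ^ ord(cb)))
--         for ca, cb in zip(a_bin.zfill(max_len), b_bin.zfill(max_len))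
--     )
-- ===== SOURCE B (Python) =====
-- def binary_xor_ascii(a: int, b: int) -> str:
--     if a < 0 or b < 0:
--         raise ValueError("the value of both inputs must be positive")
--     max_len = max(len(format(a, "b")), len(format(b, "b")))
--     return "0b" + format(a ^ b, "b").zfill(max_len)
-- ===== Notes on version B (the rewrite author's own statement) =====
-- stated objective: simpler
-- what changed: Replaced the per-character zip/ord/chr XOR loop over the zero-padded binary strings by a single integer XOR a^b formatted in binary and zero-padded to the operands' max bit width.
import Mathlib
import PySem

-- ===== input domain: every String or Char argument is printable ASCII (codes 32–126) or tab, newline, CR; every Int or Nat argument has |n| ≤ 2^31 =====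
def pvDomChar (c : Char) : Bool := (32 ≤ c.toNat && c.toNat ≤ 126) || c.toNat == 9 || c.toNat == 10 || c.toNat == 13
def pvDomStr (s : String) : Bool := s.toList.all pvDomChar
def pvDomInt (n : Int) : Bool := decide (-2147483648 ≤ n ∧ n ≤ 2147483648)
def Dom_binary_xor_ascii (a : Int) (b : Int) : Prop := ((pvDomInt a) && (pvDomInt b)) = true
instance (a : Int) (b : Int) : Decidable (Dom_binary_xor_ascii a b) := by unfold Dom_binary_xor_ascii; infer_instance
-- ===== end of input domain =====

-- B replaces A's per-character zip/ord/chr XOR loop over the zero-padded binary strings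
-- by a single integer XOR a^b formatted in binary and zero-padded (objective: simpler).

-- ===== PORT A =====
def binary_xor_ascii (a : Int) (b : Int) : String :=
  let a_bin := PySem.Int.toBinChars a
  let b_bin := PySem.Int.toBinChars b
  let max_len : Int := max (a_bin.length : Int) (b_bin.length : Int)
  String.ofList ('0' :: 'b' ::
    ((PySem.Chars.zfill a_bin max_len).zip (PySem.Chars.zfill b_bin max_len)).map
      (fun p => Char.ofNat (48 + (p.1.toNat ^^^ p.2.toNat))))

-- ===== PORT B =====
def binary_xor_ascii_alt (a : Int) (b : Int) : String :=
  let max_len : Int :=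
    max ((PySem.Int.toBinChars a).length : Int) ((PySem.Int.toBinChars b).length : Int)
  String.ofList ('0' :: 'b' ::
    PySem.Chars.zfill (PySem.Int.toBinChars (PySem.Int.bxor a b)) max_len)

-- ===== PRECONDITION & SPEC =====
-- A raises ValueError for a < 0 or b < 0 (and B raises there too); those inputs are excluded.
def Pre_binary_xor_ascii (a : Int) (b : Int) : Prop := 0 ≤ a ∧ 0 ≤ b
instance (a : Int) (b : Int) : Decidable (Pre_binary_xor_ascii a b) := by unfold Pre_binary_xor_ascii; infer_instance
def pvWitness_binary_xor_ascii : Int × Int := (25, 32)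
def Spec_binary_xor_ascii (a : Int) (b : Int) (out : String) : Prop := out = binary_xor_ascii_alt a b
instance (a : Int) (b : Int) (out : String) : Decidable (Spec_binary_xor_ascii a b out) := by unfold Spec_binary_xor_ascii; infer_instance

-- ===== CLAIM (what is proved, stated in full; the proofs are below) =====
def Claim_equal_binary_xor_ascii : Prop := ∀ (a : Int) (b : Int), Dom_binary_xor_ascii a b → Pre_binary_xor_ascii a b → Spec_binary_xor_ascii a b (binary_xor_ascii a b)

-- ===== LEMMAS AND PROOFS =====

-- MSB-first binary digits of a natural number (what format(n, "b") produces for n ≥ 0)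
def pvBits (n : Nat) : List Char :=
  if n < 2 then [Nat.digitChar n]
  else pvBits (n / 2) ++ [Nat.digitChar (n % 2)]
decreasing_by exact Nat.div_lt_self (by omega) (by omega)

-- MSB-first binary digits of n written with exactly k digits
def pvBitsK : Nat → Nat → List Char
  | 0, _ => []
  | k + 1, n => pvBitsK k (n / 2) ++ [Nat.digitChar (n % 2)]

theorem pvBits_lt_two (n : Nat) (h : n < 2) : pvBits n = [Nat.digitChar n] := by
  conv_lhs => rw [pvBits]
  rw [if_pos h]

theorem pvBits_ge_two (n : Nat) (h : ¬ n < 2) :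
    pvBits n = pvBits (n / 2) ++ [Nat.digitChar (n % 2)] := by
  conv_lhs => rw [pvBits]
  rw [if_neg h]

theorem pvToDigitsCore_two_eq (fuel : Nat) : ∀ (n : Nat) (ds : List Char), n < fuel →
    Nat.toDigitsCore 2 fuel n ds = pvBits n ++ ds := by
  induction fuel with
  | zero => intro n ds h; omega
  | succ fuel ih =>
    intro n ds h
    rw [Nat.toDigitsCore]
    by_cases h2 : n / 2 = 0
    · simp only [h2, if_true]
      have hn : n < 2 := by omega
      rw [Nat.mod_eq_of_lt hn, pvBits_lt_two n hn]
      rfl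
    · simp only [h2, if_false]
      rw [ih (n / 2) _ (by omega)]
      have hn : ¬ n < 2 := by omega
      rw [pvBits_ge_two n hn]
      simp

theorem pvToDigits_two_eq (n : Nat) : Nat.toDigits 2 n = pvBits n := by
  rw [Nat.toDigits, pvToDigitsCore_two_eq (n + 1) n [] (by omega), List.append_nil]

theorem pvBits_head (n : Nat) : ∃ c rest, pvBits n = c :: rest ∧ (c = '0' ∨ c = '1') := by
  induction n using pvBits.induct with
  | case1 n h =>
    refine ⟨Nat.digitChar n, [], pvBits_lt_two n h, ?_⟩
    interval_cases n <;> simp [Nat.digitChar]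
  | case2 n h ih =>
    obtain ⟨c, rest, hcr, hc⟩ := ih
    exact ⟨c, rest ++ [Nat.digitChar (n % 2)], by rw [pvBits_ge_two n h, hcr]; rfl, hc⟩

theorem pvBits_len_pos (n : Nat) : 0 < (pvBits n).length := by
  obtain ⟨c, rest, hcr, _⟩ := pvBits_head n
  simp [hcr]

theorem pvBits_lt (n : Nat) : n < 2 ^ (pvBits n).length := by
  induction n using pvBits.induct with
  | case1 n h => rw [pvBits_lt_two n h]; simpa using h
  | case2 n h ih =>
    rw [pvBits_ge_two n h]
    simp only [List.length_append, List.length_cons, List.length_nil, Nat.zero_add]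
    have : 2 ^ ((pvBits (n / 2)).length + 1) = 2 * 2 ^ (pvBits (n / 2)).length := by ring
    omega

theorem pvBits_len_le (n : Nat) : ∀ k, 0 < k → n < 2 ^ k → (pvBits n).length ≤ k := by
  induction n using pvBits.induct with
  | case1 n h =>
    intro k hk _
    rw [pvBits_lt_two n h]; simpa using hk
  | case2 n h ih =>
    intro k hk hn
    rw [pvBits_ge_two n h]
    simp only [List.length_append, List.length_cons, List.length_nil, Nat.zero_add]
    have hk2 : 2 ≤ k := by
      by_contra hc
      have hk1 : k = 1 := by omega
      subst hk1; omega
    have hlt : n / 2 < 2 ^ (k - 1) := by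
      have h1 : 2 ^ k = 2 * 2 ^ (k - 1) := by
        conv_lhs => rw [show k = (k - 1) + 1 from by omega]
        ring
      omega
    have := ih (k - 1) (by omega) hlt
    omega

theorem pvBitsK_length (k n : Nat) : (pvBitsK k n).length = k := by
  induction k generalizing n with
  | zero => rfl
  | succ k ih => simp [pvBitsK, ih]

theorem pvBitsK_zero (k : Nat) : pvBitsK k 0 = List.replicate k '0' := by
  induction k with
  | zero => rfl
  | succ k ih =>
    rw [pvBitsK, ih, List.replicate_succ']
    rfl

theorem pvBitsK_pad (k n : Nat) (hk : 0 < k) (hn : n < 2 ^ k) :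
    pvBitsK k n = List.replicate (k - (pvBits n).length) '0' ++ pvBits n := by
  induction k generalizing n with
  | zero => omega
  | succ k ih =>
    by_cases h2 : n < 2
    · have hb : pvBits n = [Nat.digitChar n] := pvBits_lt_two n h2
      have hd : n / 2 = 0 := by omega
      have hm : n % 2 = n := Nat.mod_eq_of_lt h2
      rw [pvBitsK, hd, pvBitsK_zero, hm, hb]
      simp
    · have hb : pvBits n = pvBits (n / 2) ++ [Nat.digitChar (n % 2)] := pvBits_ge_two n h2
      have hk' : 0 < k := by
        by_contra hc
        have hk0 : k = 0 := by omega
        subst hk0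
        omega
      have hlt : n / 2 < 2 ^ k := by
        have : 2 ^ (k + 1) = 2 * 2 ^ k := by ring
        omega
      rw [pvBitsK, ih (n / 2) hk' hlt, hb]
      have hle : (pvBits (n / 2)).length ≤ k := pvBits_len_le (n / 2) k hk' hlt
      simp only [List.length_append, List.length_cons, List.length_nil]
      rw [List.append_assoc]
      have hcount : k + 1 - ((pvBits (n / 2)).length + (0 + 1)) = k - (pvBits (n / 2)).length := by
        omega
      rw [hcount]

theorem pvMod_two_xor (m n : Nat) : (m ^^^ n) % 2 = (m % 2) ^^^ (n % 2) := by
  rw [← Nat.and_one_is_mod, ← Nat.and_one_is_mod, ← Nat.and_one_is_mod, Nat.and_xor_distrib_right]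

theorem pvXorChar (m n : Nat) :
    Char.ofNat (48 + ((Nat.digitChar (m % 2)).toNat ^^^ (Nat.digitChar (n % 2)).toNat)) =
      Nat.digitChar ((m ^^^ n) % 2) := by
  rw [pvMod_two_xor]
  rcases Nat.mod_two_eq_zero_or_one m with h1 | h1 <;>
    rcases Nat.mod_two_eq_zero_or_one n with h2 | h2 <;> rw [h1, h2] <;> decide

theorem pvBitsK_xor (k m n : Nat) :
    ((pvBitsK k m).zip (pvBitsK k n)).map
        (fun p => Char.ofNat (48 + (p.1.toNat ^^^ p.2.toNat))) = pvBitsK k (m ^^^ n) := by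
  induction k generalizing m n with
  | zero => rfl
  | succ k ih =>
    rw [pvBitsK, pvBitsK, pvBitsK,
      List.zip_append (by rw [pvBitsK_length, pvBitsK_length]), List.map_append,
      ih (m / 2) (n / 2), Nat.xor_div_two]
    congr 1
    simp [pvXorChar m n]

-- zfill of a digit string (no sign) is left-padding with '0'
theorem pvZfill_bits (n L : Nat) :
    PySem.Chars.zfill (pvBits n) (L : Int) =
      List.replicate (L - (pvBits n).length) '0' ++ pvBits n := by
  obtain ⟨c, rest, hcr, hc⟩ := pvBits_head n
  rw [PySem.Chars.zfill.eq_def]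
  by_cases h : (L : Int) ≤ ((pvBits n).length : Int)
  · rw [if_pos h]
    have : L - (pvBits n).length = 0 := by omega
    rw [this]; simp
  · rw [if_neg h, hcr]
    have hsign : ¬ (c = '+' ∨ c = '-') := by rcases hc with h | h <;> subst h <;> decide
    simp only [if_neg hsign]
    rw [← hcr]
    congr 1

theorem pvToBinChars_natCast (m : Nat) : PySem.Int.toBinChars (m : Int) = pvBits m := by
  rw [PySem.Int.toBinChars]
  rw [if_neg (by omega : ¬ (m : Int) < 0)]
  simp [pvToDigits_two_eq]

theorem pvLt_of_le (m la L : Nat) (h1 : m < 2 ^ la) (h2 : la ≤ L) : m < 2 ^ L :=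
  lt_of_lt_of_le h1 (Nat.pow_le_pow_right (by omega) h2)

-- ===== VERDICT (by name: the statement is the Claim_ definition above) =====
theorem binary_xor_ascii_spec : Claim_equal_binary_xor_ascii := by
  intro a b _ hpre
  obtain ⟨ha, hb⟩ := hpre
  unfold Spec_binary_xor_ascii binary_xor_ascii binary_xor_ascii_alt
  obtain ⟨m, rfl⟩ : ∃ m : Nat, a = (m : Int) := ⟨a.toNat, by omega⟩
  obtain ⟨n, rfl⟩ : ∃ n : Nat, b = (n : Int) := ⟨b.toNat, by omega⟩
  simp only [pvToBinChars_natCast, PySem.Int.bxor_natCast, ← Nat.cast_max]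
  set la := (pvBits m).length with hla
  set lb := (pvBits n).length with hlb
  set L := max la lb with hL
  have hL1 : 0 < L := lt_of_lt_of_le (pvBits_len_pos m) (le_max_left la lb)
  have hmL : m < 2 ^ L := pvLt_of_le m la L (pvBits_lt m) (le_max_left la lb)
  have hnL : n < 2 ^ L := pvLt_of_le n lb L (pvBits_lt n) (le_max_right la lb)
  have hxL : m ^^^ n < 2 ^ L := Nat.xor_lt_two_pow hmL hnL
  rw [pvZfill_bits m L, pvZfill_bits n L, pvZfill_bits (m ^^^ n) L,
    ← pvBitsK_pad L m hL1 hmL, ← pvBitsK_pad L n hL1 hnL,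
    ← pvBitsK_pad L (m ^^^ n) hL1 hxL, pvBitsK_xor L m n]
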